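-- pv_equiv track=rewrite | github.com/Faire90/RNGTester | Main.py | checkRepeats
-- ===== SOURCE A (Python) =====
-- def checkRepeats(list, streakLength):
--     repeats = 0
--     streak = 0
--     for i in range(len(list)):
--         if i == 0:
--             pass
--         elif list[i] == list[i-1]:
--            streak += 1
--         else:
--             streak = 0
--         if streak == (streakLength - 1):
--             streak = 0
--             repeats += 1
--     return repeats
-- ===== SOURCE B (Python) =====
-- def checkRepeats(list, streakLength):
--     if streakLength <= 0:
--         return 0
--     # one pass: lengths of maximal runs of equal elements
--     lengths = []
--     prev = None
--     for x in list:
--         if lengths and x == prev: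
--             lengths[-1] += 1
--         else:
--             lengths.append(1)
--         prev = x
--     if streakLength == 1:
--         return len(lengths)
--     return sum((L - 1) // (streakLength - 1) for L in lengths)
-- ===== Notes on version B (the rewrite author's own statement) =====
-- stated objective: alternative
-- what changed: B replaces A's per-element streak counter with a single run-length pass (lengths of maximal runs of equal elements) followed by a per-run arithmetic step: number of runs when streakLength == 1, sum of (L-1)//(streakLength-1) over run lengths when streakLength >= 2, and 0 when streakLength <= 0.
import Mathlib
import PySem

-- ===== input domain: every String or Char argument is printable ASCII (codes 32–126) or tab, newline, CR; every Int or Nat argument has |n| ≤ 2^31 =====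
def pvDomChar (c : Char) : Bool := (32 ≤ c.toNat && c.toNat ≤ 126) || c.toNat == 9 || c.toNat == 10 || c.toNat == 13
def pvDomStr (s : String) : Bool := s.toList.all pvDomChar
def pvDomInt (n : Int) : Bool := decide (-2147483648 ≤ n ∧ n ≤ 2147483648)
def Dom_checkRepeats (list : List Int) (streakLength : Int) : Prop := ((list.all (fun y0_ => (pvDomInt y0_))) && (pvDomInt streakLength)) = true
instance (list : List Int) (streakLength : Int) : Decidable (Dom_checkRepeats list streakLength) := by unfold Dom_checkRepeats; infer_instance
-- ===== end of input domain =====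

-- B replaces A's per-element streak counter by a run-length pass plus per-run floor division (objective: alternative decomposition, same cost).

-- ===== PORT A =====
-- literal port of A's index loop: fold over range(len(list)) carrying (repeats, streak)
def checkRepeats (list : List Int) (streakLength : Int) : Int :=
  ((List.range list.length).foldl
    (fun (st : Int × Int) (i : Nat) =>
      let streak :=
        if i = 0 then st.2
        else if (PySem.List.pyGet? list (i : Int)).getD 0
                 = (PySem.List.pyGet? list ((i : Int) - 1)).getD 0 then st.2 + 1
        else (0 : Int)
      if streak = streakLength - 1 then (st.1 + 1, (0 : Int)) else (st.1, streak))
    ((0 : Int), (0 : Int))).1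

-- ===== PORT B =====
-- B's run-length pass: lengths kept in reverse order (Python appends / bumps lengths[-1])
def pvRunsB (list : List Int) : List Int :=
  ((list.foldl
    (fun (st : List Int × Option Int) (x : Int) =>
      match st.1, st.2 with
      | c :: rest, some p => if x = p then ((c + 1) :: rest, some x) else (1 :: c :: rest, some x)
      | ls, _ => (1 :: ls, some x))
    ([], none)).1).reverse

def checkRepeats_alt (list : List Int) (streakLength : Int) : Int :=
  if streakLength ≤ 0 then 0
  else
    let lengths := pvRunsB list
    if streakLength = 1 then (lengths.length : Int)
    else lengths.foldl (fun acc L => acc + PySem.Int.floordiv (L - 1) (streakLength - 1)) 0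

-- ===== PRECONDITION & SPEC =====
def Spec_checkRepeats (list : List Int) (streakLength : Int) (out : Int) : Prop := out = checkRepeats_alt list streakLength
instance (list : List Int) (streakLength : Int) (out : Int) : Decidable (Spec_checkRepeats list streakLength out) := by unfold Spec_checkRepeats; infer_instance

-- ===== CLAIM (what is proved, stated in full; the proofs are below) =====
def Claim_equal_checkRepeats : Prop := ∀ (list : List Int) (streakLength : Int), Dom_checkRepeats list streakLength → Spec_checkRepeats list streakLength (checkRepeats list streakLength)

-- ===== LEMMAS AND PROOFS =====

-- structural version of A's loop from the second element on
def loopA (k : Int) (prev r s : Int) : List Int → Int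
  | [] => r
  | y :: ys =>
      let s' := if y = prev then s + 1 else (0 : Int)
      if s' = k - 1 then loopA k y (r + 1) 0 ys else loopA k y r s' ys

-- A's step function, abbreviated
def stepA (k : Int) (l : List Int) (st : Int × Int) (i : Nat) : Int × Int :=
  let streak :=
    if i = 0 then st.2
    else if (PySem.List.pyGet? l (i : Int)).getD 0
             = (PySem.List.pyGet? l ((i : Int) - 1)).getD 0 then st.2 + 1
    else (0 : Int)
  if streak = k - 1 then (st.1 + 1, (0 : Int)) else (st.1, streak)

-- B's step function
def stepB (st : List Int × Option Int) (x : Int) : List Int × Option Int :=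
  match st.1, st.2 with
  | c :: rest, some p => if x = p then ((c + 1) :: rest, some x) else (1 :: c :: rest, some x)
  | ls, _ => (1 :: ls, some x)

def divSum (k : Int) (ls : List Int) : Int := (ls.map (fun L => (L - 1) / (k - 1))).sum

lemma loopA_bridge (k : Int) :
    ∀ (xs pre : List Int) (x r s : Int),
      ((List.range' (pre.length + 1) xs.length).foldl (stepA k (pre ++ x :: xs)) (r, s)).1
        = loopA k x r s xs := by
  intro xs
  induction xs with
  | nil => intro pre x r s; simp [loopA]
  | cons y ys ih =>
      intro pre x r s
      have h1 : PySem.List.pyGet? (pre ++ x :: y :: ys) (((pre.length + 1 : Nat) : Int)) = some y := by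
        have hre : pre ++ x :: y :: ys = (pre ++ [x]) ++ y :: ys := by simp
        have hl : ((pre.length + 1 : Nat) : Int) = (((pre ++ [x]).length : Nat) : Int) := by simp
        rw [hre, hl, PySem.List.pyGet?_natCast]
        simp
      have h2 : PySem.List.pyGet? (pre ++ x :: y :: ys) (((pre.length + 1 : Nat) : Int) - 1) = some x := by
        have hl : ((pre.length + 1 : Nat) : Int) - 1 = ((pre.length : Nat) : Int) := by push_cast; ring
        rw [hl, PySem.List.pyGet?_natCast]
        simp
      rw [List.length_cons, List.range'_succ, List.foldl_cons]
      have hstep : stepA k (pre ++ x :: y :: ys) (r, s) (pre.length + 1)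
          = (if (if y = x then s + 1 else (0:Int)) = k - 1 then (r + 1, (0:Int))
             else (r, if y = x then s + 1 else (0:Int))) := by
        simp only [stepA, h1, h2]
        simp only [Nat.succ_ne_zero, if_false, Option.getD_some]
        rfl
      rw [hstep]
      have hre : pre ++ x :: y :: ys = (pre ++ [x]) ++ y :: ys := by simp
      by_cases hy : (if y = x then s + 1 else (0:Int)) = k - 1
      · rw [if_pos hy]
        have := ih (pre ++ [x]) y (r + 1) 0
        simp only [List.length_append, List.length_singleton] at this
        rw [hre, this]
        simp only [loopA]
        rw [if_pos hy]
      · rw [if_neg hy]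
        have := ih (pre ++ [x]) y r (if y = x then s + 1 else (0:Int))
        simp only [List.length_append, List.length_singleton] at this
        rw [hre, this]
        simp only [loopA]
        rw [if_neg hy]

lemma checkRepeats_eq_fold (l : List Int) (k : Int) :
    checkRepeats l k = ((List.range l.length).foldl (stepA k l) ((0:Int), (0:Int))).1 := rfl

lemma checkRepeats_eq_loopA (k : Int) :
    ∀ l : List Int, checkRepeats l k =
      match l with
      | [] => 0
      | x :: xs => if (0 : Int) = k - 1 then loopA k x 1 0 xs else loopA k x 0 0 xs := by
  intro l
  cases l with
  | nil => simp [checkRepeats]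
  | cons x xs =>
      rw [checkRepeats_eq_fold]
      have hr : List.range (x :: xs).length = 0 :: List.range' 1 xs.length := by
        rw [List.range_eq_range', List.length_cons, List.range'_succ]
      rw [hr, List.foldl_cons]
      have hfirst : stepA k (x :: xs) ((0:Int), (0:Int)) 0
          = (if (0:Int) = k - 1 then ((1:Int), (0:Int)) else ((0:Int), (0:Int))) := by
        simp [stepA]
      rw [hfirst]
      show _ = if (0:Int) = k - 1 then loopA k x 1 0 xs else loopA k x 0 0 xs
      by_cases h0 : (0 : Int) = k - 1
      · rw [if_pos h0, if_pos h0]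
        simpa using loopA_bridge k xs [] x 1 0
      · rw [if_neg h0, if_neg h0]
        simpa using loopA_bridge k xs [] x 0 0

-- k ≤ 0 : A never counts (streak stays ≥ 0)
lemma loopA_nonpos (k : Int) (hk : k ≤ 0) :
    ∀ (xs : List Int) (x r s : Int), 0 ≤ s → loopA k x r s xs = r := by
  intro xs
  induction xs with
  | nil => intro x r s _; rfl
  | cons y ys ih =>
      intro x r s hs
      simp only [loopA]
      have hne : (if y = x then s + 1 else (0:Int)) ≠ k - 1 := by
        split_ifs <;> omega
      rw [if_neg hne]
      apply ih
      split_ifs <;> omega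

-- k = 1 : A counts run starts; B state tracks run lengths in reverse
lemma loopA_one :
    ∀ (xs : List Int) (x r s : Int) (c : Int) (ls : List Int), 0 ≤ s →
      loopA 1 x r s xs
        = r + (((xs.foldl stepB (c :: ls, some x)).1.length : Int) - ((c :: ls).length : Int)) := by
  intro xs
  induction xs with
  | nil => intro x r s c ls _; simp [loopA]
  | cons y ys ih =>
      intro x r s c ls hs
      simp only [loopA, List.foldl_cons, stepB]
      by_cases hy : y = x
      · rw [if_pos hy]
        have hne : s + 1 ≠ (1:Int) - 1 := by omega
        rw [if_neg hne]
        simp only [if_pos hy]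
        rw [ih y r (s+1) (c+1) ls (by omega)]
        simp
      · rw [if_neg hy]
        have heq : (0:Int) = (1:Int) - 1 := by norm_num
        rw [if_pos heq]
        simp only [if_neg hy]
        rw [ih y (r+1) 0 1 (c :: ls) (by omega)]
        simp only [List.length_cons]
        push_cast
        ring

lemma ediv_emod_succ (d n : Int) (hd : 1 ≤ d) (_hn : 0 ≤ n) :
    (if n % d + 1 = d then ((n+1) / d = n / d + 1 ∧ (n+1) % d = 0)
     else ((n+1) / d = n / d ∧ (n+1) % d = n % d + 1)) := by
  have hd0 : (0:Int) < d := by omega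
  have hmod : 0 ≤ n % d := Int.emod_nonneg n (by omega)
  have hmod2 : n % d < d := Int.emod_lt_of_pos n hd0
  have hdm : n % d + d * (n / d) = n := Int.emod_add_mul_ediv n d
  split_ifs with h
  · exact (Int.ediv_emod_unique (a := n+1) (b := d) (q := n / d + 1) (r := 0) hd0).mpr
      ⟨by linear_combination hdm - h, le_rfl, hd0⟩
  · exact (Int.ediv_emod_unique (a := n+1) (b := d) (q := n / d) (r := n % d + 1) hd0).mpr
      ⟨by linear_combination hdm, by omega, by omega⟩

-- k ≥ 2 : both sides simultaneously, invariant s = (c-1) % (k-1)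
lemma loopA_ge_two (k : Int) (hk : 2 ≤ k) :
    ∀ (xs : List Int) (x r : Int) (c : Int) (ls : List Int), 1 ≤ c →
      loopA k x r ((c - 1) % (k - 1)) xs
        = r + divSum k (xs.foldl stepB (c :: ls, some x)).1 - divSum k (c :: ls) := by
  intro xs
  induction xs with
  | nil => intro x r c ls _; simp [loopA]
  | cons y ys ih =>
      intro x r c ls hc
      have hd1 : (1:Int) ≤ k - 1 := by omega
      have hc0 : (0:Int) ≤ c - 1 := by omega
      have hstep := ediv_emod_succ (k-1) (c-1) hd1 hc0
      have hc1 : c - 1 + 1 = c := by ring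
      rw [hc1] at hstep
      have hcc : c + 1 - 1 = c := by ring
      simp only [loopA, List.foldl_cons, stepB]
      by_cases hy : y = x
      · simp only [if_pos hy]
        by_cases hfull : (c - 1) % (k - 1) + 1 = k - 1
        · rw [if_pos hfull] at hstep
          rw [if_pos hfull]
          have hih := ih y (r + 1) (c + 1) ls (by omega)
          rw [hcc, hstep.2] at hih
          rw [hih]
          simp only [divSum, List.map_cons, List.sum_cons, hcc, hstep.1]
          ring
        · rw [if_neg hfull] at hstep
          rw [if_neg hfull]
          have hih := ih y r (c + 1) ls (by omega)
          rw [hcc, hstep.2] at hih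
          rw [hih]
          simp only [divSum, List.map_cons, List.sum_cons, hcc, hstep.1]
      · simp only [if_neg hy]
        have hcnt : (0:Int) ≠ k - 1 := by omega
        rw [if_neg hcnt]
        have hih := ih y r 1 (c :: ls) le_rfl
        have h11 : ((1:Int) - 1) % (k - 1) = 0 := by norm_num
        rw [h11] at hih
        rw [hih]
        simp only [divSum, List.map_cons, List.sum_cons]
        norm_num

lemma pvRunsB_cons (x : Int) (xs : List Int) :
    pvRunsB (x :: xs) = ((xs.foldl stepB ([1], some x)).1).reverse := rfl

-- B's division fold equals divSum (k ≥ 2), over any order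
lemma foldDiv_eq_divSum (k : Int) (hk : 2 ≤ k) (ls : List Int) :
    ls.foldl (fun acc L => acc + PySem.Int.floordiv (L - 1) (k - 1)) 0 = divSum k ls := by
  have h : ∀ (L : Int), PySem.Int.floordiv (L - 1) (k - 1) = (L - 1) / (k - 1) := by
    intro L; exact PySem.Int.floordiv_eq_ediv_of_pos (by omega)
  have : ∀ (a : Int), ls.foldl (fun acc L => acc + PySem.Int.floordiv (L - 1) (k - 1)) a
      = a + divSum k ls := by
    induction ls with
    | nil => intro a; simp [divSum]
    | cons y ys ih =>
        intro a
        simp only [List.foldl_cons, divSum, List.map_cons, List.sum_cons]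
        rw [ih, h]
        simp [divSum]
        ring
  simpa using this 0

lemma divSum_reverse (k : Int) (ls : List Int) : divSum k ls.reverse = divSum k ls := by
  simp [divSum]

-- ===== VERDICT (by name: the statement is the Claim_ definition above) =====
theorem checkRepeats_spec : Claim_equal_checkRepeats := by
  intro l k _
  show checkRepeats l k = checkRepeats_alt l k
  cases l with
  | nil =>
      have hA : checkRepeats ([] : List Int) k = 0 := rfl
      rw [hA]
      simp only [checkRepeats_alt, pvRunsB]
      split_ifs <;> simp
  | cons x xs =>
      have hA : checkRepeats (x :: xs) k
          = if (0:Int) = k - 1 then loopA k x 1 0 xs else loopA k x 0 0 xs :=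
        checkRepeats_eq_loopA k (x :: xs)
      rw [hA]
      unfold checkRepeats_alt
      by_cases hk0 : k ≤ 0
      · have h0 : (0:Int) ≠ k - 1 := by omega
        rw [if_neg h0, if_pos hk0]
        exact loopA_nonpos k hk0 xs x 0 0 le_rfl
      · rw [if_neg hk0]
        by_cases hk1 : k = 1
        · subst hk1
          rw [if_pos rfl]
          have h0 : (0:Int) = (1:Int) - 1 := by norm_num
          rw [if_pos h0]
          rw [loopA_one xs x 1 0 1 [] le_rfl]
          rw [pvRunsB_cons]
          simp
        · have hk2 : 2 ≤ k := by omega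
          have h0 : (0:Int) ≠ k - 1 := by omega
          rw [if_neg h0, if_neg hk1]
          rw [pvRunsB_cons, foldDiv_eq_divSum k hk2, divSum_reverse]
          have h00 : (0:Int) = ((1:Int) - 1) % (k - 1) := by simp
          calc loopA k x 0 0 xs
              = loopA k x 0 (((1:Int) - 1) % (k - 1)) xs := by rw [← h00]
            _ = 0 + divSum k (xs.foldl stepB ([1], some x)).1 - divSum k [1] := by
                exact loopA_ge_two k hk2 xs x 0 1 [] le_rfl
            _ = divSum k (xs.foldl stepB ([1], some x)).1 := by
                simp [divSum]
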